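-- pv_equiv track=rewrite | github.com/bamaxw/ion | ion/list.py | trim_list
-- ===== SOURCE A (Python) =====
-- from typing import Sequence, Iterable, Generator, TypeVar
--
-- T = TypeVar('T')
--
-- def trim_list(lst: Iterable[T], trim: T = '') -> Iterable[T]:
--     '''
--     Look at the beginning and end of a list and trim elements that are equal to trim
--     Args:
--         - lst: list to be trimmed
--         - trim: elements of lst at the beginning and the end equal to this argument will be removed
--     Usage:
--         >>> trim_list(['', 'max', ''])
--         ['max']
--         >>> trim_list(['max', 'max', '', '', 'max'], trim='max')
--         ['', '']
--     '''
--     if not lst: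
--         return []
--     for start, elem in enumerate(lst):
--         if elem != trim:
--             break
--     else:
--         return []
--     for end, elem in reversed(list(enumerate(lst))):
--         if elem != trim:
--             break
--     return lst[start:end + 1]
-- ===== SOURCE B (Python) =====
-- def trim_list(lst, trim=''):
--     start = None
--     end = 0
--     for i, elem in enumerate(lst):
--         if elem != trim:
--             if start is None:
--                 start = i
--             end = i
--     if start is None:
--         return []
--     return lst[start:end + 1]
-- ===== Notes on version B (the rewrite author's own statement) =====
-- stated objective: simpler
-- what changed: Replaced A's empty-check plus forward scan plus reversed(list(enumerate(...))) backward scan with one forward pass that records the first and last non-trim index, then slices once.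
import Mathlib
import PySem

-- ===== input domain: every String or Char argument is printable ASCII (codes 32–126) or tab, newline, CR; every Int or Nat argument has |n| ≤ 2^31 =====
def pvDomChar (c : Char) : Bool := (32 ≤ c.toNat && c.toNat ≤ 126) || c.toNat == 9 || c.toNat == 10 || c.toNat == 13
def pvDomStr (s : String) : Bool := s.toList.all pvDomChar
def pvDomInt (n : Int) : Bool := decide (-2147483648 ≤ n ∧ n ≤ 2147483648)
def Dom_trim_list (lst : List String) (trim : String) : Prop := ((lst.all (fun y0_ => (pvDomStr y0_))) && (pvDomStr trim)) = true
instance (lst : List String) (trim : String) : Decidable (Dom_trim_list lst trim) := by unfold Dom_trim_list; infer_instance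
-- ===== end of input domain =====

-- B: one forward pass recording the first and last non-trim index, instead of A's two scans; same return value.
-- ===== PORT A =====
-- the 'for …: if elem != trim: break' loops of A: first pair whose element differs from trim
def pvFindBreak (l : List (Int × String)) (trim : String) : Option Int :=
  match l with
  | [] => none
  | (i, x) :: rest => if x ≠ trim then some i else pvFindBreak rest trim

def trim_list (lst : List String) (trim : String) : List String :=
  if lst = [] then []
  else
    match pvFindBreak (PySem.List.enumerate lst) trim with
    | none => []          -- the for-else: no break in the first loop
    | some start =>
      match pvFindBreak (PySem.List.enumerate lst).reverse trim with
      | some e => PySem.List.slice lst (some start) (some (e + 1))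
      | none => PySem.List.slice lst (some start) (some (0 + 1))  -- no break: end holds the last loop index, 0

-- ===== PORT B =====
def pvStep (trim : String) (acc : Option Int × Int) (p : Int × String) : Option Int × Int :=
  if p.2 ≠ trim then ((if acc.1.isNone then some p.1 else acc.1), p.1) else acc

def trim_list_alt (lst : List String) (trim : String) : List String :=
  let r := (PySem.List.enumerate lst).foldl (pvStep trim) (none, 0)
  match r.1 with
  | none => []
  | some s => PySem.List.slice lst (some s) (some (r.2 + 1))

-- ===== PRECONDITION & SPEC =====
def Spec_trim_list (lst : List String) (trim : String) (out : List String) : Prop := out = trim_list_alt lst trim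
instance (lst : List String) (trim : String) (out : List String) : Decidable (Spec_trim_list lst trim out) := by unfold Spec_trim_list; infer_instance

-- ===== CLAIM (what is proved, stated in full; the proofs are below) =====
def Claim_equal_trim_list : Prop := ∀ (lst : List String) (trim : String), Dom_trim_list lst trim → Spec_trim_list lst trim (trim_list lst trim)

-- ===== LEMMAS AND PROOFS =====

-- ===== VERDICT (by name: the statement is the Claim_ definition above) =====
lemma pvFindBreak_append (a b : List (Int × String)) (t : String) :
    pvFindBreak (a ++ b) t = (pvFindBreak a t).or (pvFindBreak b t) := by
  induction a with
  | nil => simp [pvFindBreak]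
  | cons p rest ih =>
      simp only [List.cons_append, pvFindBreak]
      split <;> simp [ih]

lemma pvFold_spec (l : List (Int × String)) (t : String) (acc : Option Int × Int) :
    l.foldl (pvStep t) acc =
      ((if acc.1.isNone then pvFindBreak l t else acc.1),
       (match pvFindBreak l.reverse t with | some e => e | none => acc.2)) := by
  induction l generalizing acc with
  | nil => cases acc with | mk a b => cases a <;> simp [pvFindBreak]
  | cons p rest ih =>
      simp only [List.foldl_cons, ih, List.reverse_cons, pvFindBreak_append]
      by_cases hp : p.2 = t
      · simp [pvStep, pvFindBreak, hp]
      · have h1 : pvFindBreak [p] t = some p.1 := by simp [pvFindBreak, hp]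
        simp only [pvStep, if_pos hp, h1]
        cases hr : pvFindBreak rest.reverse t <;>
          cases ha : acc.1 <;>
            simp [pvFindBreak, hp, Option.or]

theorem trim_list_spec : Claim_equal_trim_list := by
  intro lst trim _
  unfold Spec_trim_list trim_list trim_list_alt
  rcases hl : lst with _ | ⟨x, xs⟩
  · simp [PySem.List.enumerate]
  · simp only [reduceCtorEq, if_false]
    rw [pvFold_spec]
    cases h1 : pvFindBreak (PySem.List.enumerate (x :: xs)) trim <;>
      cases h2 : pvFindBreak (PySem.List.enumerate (x :: xs)).reverse trim <;>
        simp
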